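-- pv_equiv track=rewrite | github.com/CE-Walf/Algorithm-problem-solving | 프로그래머스/unrated/181904. 세로 읽기/세로 읽기.py | solution
-- ===== SOURCE A (Python) =====
-- def solution(my_string, m, c):
--     answer = ''
--     string_list = list()
--
--     for i in range(0, len(my_string)//m):
--         string_list.append(my_string[m*i:m*i+m])
--
--     for val in string_list:
--         answer += val[c-1]
--
--
--     return answer
-- ===== SOURCE B (Python) =====
-- def solution(my_string, m, c):
--     n = len(my_string) // m
--     return my_string[c-1 : n*m : m]
-- ===== Notes on version B (the rewrite author's own statement) =====
-- stated objective: simpler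
-- what changed: Replaces the chunk-rows-then-index two-loop construction with a single strided slice my_string[c-1 : (len//m)*m : m], keeping no intermediate row list.
-- outside the precondition, e.g. on solution('abcd', 2, 0): A returns 'bd', B returns 'd'; on solution('abcdef', 2, -1): A returns 'ace', B returns 'e'
import Mathlib
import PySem

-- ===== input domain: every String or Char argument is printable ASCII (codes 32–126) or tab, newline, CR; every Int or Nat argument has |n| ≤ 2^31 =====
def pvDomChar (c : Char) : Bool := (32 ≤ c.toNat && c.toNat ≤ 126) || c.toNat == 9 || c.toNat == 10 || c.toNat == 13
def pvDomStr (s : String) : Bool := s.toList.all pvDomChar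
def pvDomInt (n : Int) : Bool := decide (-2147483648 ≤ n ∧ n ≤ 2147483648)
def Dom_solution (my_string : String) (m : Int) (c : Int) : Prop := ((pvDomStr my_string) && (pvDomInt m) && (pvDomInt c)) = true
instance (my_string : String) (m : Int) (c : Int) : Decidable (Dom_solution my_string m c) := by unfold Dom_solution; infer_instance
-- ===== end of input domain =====

-- B replaces A's chunk-rows-then-index two-loop construction with a single strided slice (simpler decomposition).


-- ===== PORT A =====
-- literal port of A: build the list of complete rows my_string[m*i:m*i+m], then
-- concatenate val[c-1] of each row (pyGet? = none is Python's IndexError, excluded by Pre_).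
def solution (my_string : String) (m : Int) (c : Int) : String :=
  let L := my_string.toList
  let stringList : List (List Char) :=
    (PySem.List.pyRange 0 (PySem.Int.floordiv (L.length : Int) m) 1).foldl
      (fun acc i => acc ++ [PySem.List.slice L (some (m * i)) (some (m * i + m))]) []
  let ans : List Char :=
    stringList.foldl
      (fun acc val => acc ++ ((PySem.List.pyGet? val (c - 1)).map (fun ch => [ch])).getD []) []
  String.ofList ans

-- ===== PORT B =====
-- literal port of B: n = len(my_string) // m; return my_string[c-1 : n*m : m]
-- (slice? = none exactly for step 0, excluded by Pre_ via m ≠ 0)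
def solution_alt (my_string : String) (m : Int) (c : Int) : String :=
  let n := PySem.Int.floordiv (PySem.Str.len my_string) m
  (PySem.Str.slice? my_string (some (c - 1)) (some (n * m)) m).getD ""

-- ===== PRECONDITION & SPEC =====
-- Pre_ excludes (a) the inputs where A raises — m = 0 (ZeroDivisionError) and, with at least one
-- complete row (1 ≤ m ≤ len), c > m or c < 1-m (IndexError in val[c-1]) — and (b) the corner
-- 1 ≤ m < len, 1-m ≤ c ≤ 0, where for the 1-based column index c A's negative index val[c-1]
-- accidentally wraps to column m+c while B's slice reads from position len+c-1: both values are
-- artefacts of the two implementations on an input no one would specify, so neither is matched.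
-- (The case m = len with 1-m ≤ c ≤ 0 stays inside Pre_: there A and B agree, and it is proved.)
def Pre_solution (my_string : String) (m : Int) (c : Int) : Prop :=
  m ≠ 0 ∧ ((1 ≤ m ∧ m ≤ PySem.Str.len my_string) →
    (1 - m ≤ c ∧ c ≤ m ∧ (1 ≤ c ∨ m = PySem.Str.len my_string)))
instance (my_string : String) (m : Int) (c : Int) : Decidable (Pre_solution my_string m c) := by unfold Pre_solution; infer_instance
def pvWitness_solution : String × Int × Int := ("ihdrlove", 4, 2)
def Spec_solution (my_string : String) (m : Int) (c : Int) (out : String) : Prop := out = solution_alt my_string m c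
instance (my_string : String) (m : Int) (c : Int) (out : String) : Decidable (Spec_solution my_string m c out) := by unfold Spec_solution; infer_instance

-- ===== CLAIM (what is proved, stated in full; the proofs are below) =====
def Claim_equal_solution : Prop := ∀ (my_string : String) (m : Int) (c : Int), Dom_solution my_string m c → Pre_solution my_string m c → Spec_solution my_string m c (solution my_string m c)

-- ===== LEMMAS AND PROOFS =====

-- the natural case 1 ≤ c ≤ m (any string): A's two folds produce exactly B's strided slice
theorem case_main (L : List Char) (m c : Int) (hm : 1 ≤ m) (hc1 : 1 ≤ c) (hcm : c ≤ m) :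
    (((PySem.List.pyRange 0 (PySem.Int.floordiv (L.length : Int) m) 1).foldl
      (fun acc i => acc ++ [PySem.List.slice L (some (m * i)) (some (m * i + m))]) []).foldl
      (fun acc val => acc ++ ((PySem.List.pyGet? val (c - 1)).map (fun ch => [ch])).getD []) [])
    = (PySem.Chars.slice? L (some (c - 1)) (some ((PySem.Int.floordiv (L.length : Int) m) * m)) m).getD [] := by
  obtain ⟨M, rfl⟩ : ∃ M : Nat, m = (M : Int) := ⟨m.toNat, by omega⟩
  obtain ⟨C, hC⟩ : ∃ C : Nat, c - 1 = (C : Int) := ⟨(c-1).toNat, by omega⟩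
  have hCM : C < M := by omega
  rw [hC]
  set N : Nat := L.length / M with hN
  have hfd : PySem.Int.floordiv (L.length : Int) (M : Int) = (N : Int) := by
    rw [PySem.Int.floordiv_natCast]
  rw [hfd]
  have hNM : N * M ≤ L.length := Nat.div_mul_le_self _ _
  rw [PySem.List.pyRange_zero_natCast, PySem.List.foldl_append_singleton_eq_map,
      List.map_map, PySem.List.foldl_append_eq_flatMap]
  rw [List.nil_append, List.nil_append, List.flatMap_map]
  simp only [Function.comp_apply]
  have hfun : ∀ i : Nat,
      (Option.map (fun ch => [ch]) (PySem.List.pyGet?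
        (PySem.List.slice L (some ((M:Int) * (i:Int))) (some ((M:Int) * (i:Int) + (M:Int)))) ((C:Int)))).getD []
      = (L[C + M*i]?).toList := by
    intro i
    have h1 : ((M:Int) * (i:Int)) = ((M*i : Nat) : Int) := by push_cast; ring
    rw [h1, PySem.List.slice_natCast_add, PySem.List.pyGet?_natCast]
    rw [List.getElem?_take, if_pos hCM, List.getElem?_drop]
    have h2 : M*i + C = C + M*i := by ring
    rw [h2]
    cases L[C + M*i]? <;> simp
  have hA : (List.flatMap (fun (i : Nat) =>
      (Option.map (fun ch => [ch]) (PySem.List.pyGet?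
        (PySem.List.slice L (some ((M:Int) * (i:Int))) (some ((M:Int) * (i:Int) + (M:Int)))) ((C:Int)))).getD [])
      (List.range N))
      = List.filterMap (fun k => L[C + M*k]?) (List.range N) := by
    rw [List.filterMap_eq_flatMap_toList]
    exact List.flatMap_congr (fun i _ => hfun i)
  rw [hA]
  rw [PySem.Chars.slice?_eq_listSlice?]
  have hM0 : ((M:Int)) ≠ 0 := by omega
  have hMneg : ¬ ((M:Int) < 0) := by omega
  simp only [PySem.List.slice?, PySem.List.sliceIndices, if_neg hM0, if_neg hMneg, if_pos (by omega : (0:Int) < (M:Int))]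
  simp only [Option.getD_some]
  have h3 : ¬ ((C:Int) < 0) := by omega
  have h4 : ¬ ((N:Int) * (M:Int) < 0) := not_lt.mpr (by positivity)
  rw [if_neg h3, if_neg h4]
  have h5 : min ((N:Int)*(M:Int)) (L.length:Int) = (N:Int)*(M:Int) := by
    have : ((N:Int))*(M:Int) = ((N*M : Nat) : Int) := by push_cast; ring
    rw [this]; have := hNM; omega
  rw [h5]
  rcases Nat.eq_zero_or_pos N with h0 | hNpos
  · rw [h0]
    have h10 : ¬ (min ((C:Int)) (L.length:Int) < (0:Int)*(M:Int)) := by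
      rw [zero_mul]; omega
    simp only [Nat.cast_zero, List.range_zero, List.filterMap_nil, if_neg h10]
  · have hMpos : 0 < M := by omega
    have hMlen : M ≤ L.length := by
      have := (Nat.one_le_div_iff hMpos).mp hNpos
      omega
    have h6 : min ((C:Int)) (L.length:Int) = (C:Int) := by omega
    rw [h6]
    have h7 : (C:Int) < (N:Int)*(M:Int) := by
      have : (1:Int) * (M:Int) ≤ (N:Int)*(M:Int) := by
        apply mul_le_mul_of_nonneg_right <;> omega
      omega
    rw [if_pos h7]
    have h8 : ((N:Int)*(M:Int) - (C:Int) + (M:Int) - 1) = (((M - 1 - C : Nat)):Int) + (N:Int) * (M:Int) := by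
      omega
    rw [h8, Int.add_mul_ediv_right _ _ hM0,
        Int.ediv_eq_zero_of_lt (by positivity) (by exact_mod_cast (by omega : M - 1 - C < M))]
    simp only [zero_add, Int.toNat_natCast]
    apply List.filterMap_congr
    intro x _
    have h9 : ((C:Int) + (M:Int)*(x:Int)) = ((C + M*x : Nat) : Int) := by push_cast; ring
    rw [h9, Int.toNat_natCast]

-- m ≤ -1: A builds no rows and returns '', B's negative-step slice is empty too
theorem case_neg (L : List Char) (m c : Int) (hm : m ≤ -1) :
    (((PySem.List.pyRange 0 (PySem.Int.floordiv (L.length : Int) m) 1).foldl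
      (fun acc i => acc ++ [PySem.List.slice L (some (m * i)) (some (m * i + m))]) []).foldl
      (fun acc val => acc ++ ((PySem.List.pyGet? val (c - 1)).map (fun ch => [ch])).getD []) [])
    = (PySem.Chars.slice? L (some (c - 1)) (some ((PySem.Int.floordiv (L.length : Int) m) * m)) m).getD [] := by
  set n := PySem.Int.floordiv (L.length : Int) m with hn
  have hnm : (L.length : Int) ≤ n * m := by
    have h1 := PySem.Int.floordiv_mul_add_mod (L.length : Int) m
    have h2 := PySem.Int.mod_neg_bounds (L.length : Int) (by omega : m < 0)
    rw [← hn] at h1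
    omega
  have hn0 : ¬ ((0:Int) < n) := by nlinarith [Int.natCast_nonneg L.length]
  have hrange : PySem.List.pyRange 0 n 1 = [] := by
    simp [PySem.List.pyRange, hn0]
  rw [hrange]
  simp only [List.foldl_nil]
  rw [PySem.Chars.slice?_eq_listSlice?]
  have hM0 : m ≠ 0 := by omega
  have hMneg : m < 0 := by omega
  simp only [PySem.List.slice?, PySem.List.sliceIndices, if_neg hM0, if_pos hMneg,
    if_neg (by omega : ¬ (0:Int) < m)]
  have hstop : ¬ (n * m < 0) := by omega
  rw [if_neg hstop]
  have hse : ¬ (min (n*m) ((L.length:Int) - 1) <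
      (if c - 1 < 0 then max (c - 1 + (L.length:Int)) (-1) else min (c - 1) ((L.length:Int) - 1))) := by
    split_ifs with h <;> omega
  rw [if_neg hse]
  simp

-- 1 ≤ m, len < m: no complete row, both sides are ''
theorem case_short (L : List Char) (m c : Int) (hm : 1 ≤ m) (hlen : (L.length : Int) < m) :
    (((PySem.List.pyRange 0 (PySem.Int.floordiv (L.length : Int) m) 1).foldl
      (fun acc i => acc ++ [PySem.List.slice L (some (m * i)) (some (m * i + m))]) []).foldl
      (fun acc val => acc ++ ((PySem.List.pyGet? val (c - 1)).map (fun ch => [ch])).getD []) [])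
    = (PySem.Chars.slice? L (some (c - 1)) (some ((PySem.Int.floordiv (L.length : Int) m) * m)) m).getD [] := by
  have hn : PySem.Int.floordiv (L.length : Int) m = 0 := by
    rw [PySem.Int.floordiv_eq_ediv_of_pos (by omega : (0:Int) < m)]
    exact Int.ediv_eq_zero_of_lt (by positivity) hlen
  rw [hn]
  have hrange : PySem.List.pyRange 0 0 1 = [] := by decide
  rw [hrange]
  simp only [List.foldl_nil, zero_mul]
  rw [PySem.Chars.slice?_eq_listSlice?]
  have hM0 : m ≠ 0 := by omega
  simp only [PySem.List.slice?, PySem.List.sliceIndices, if_neg hM0,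
    if_neg (by omega : ¬ m < 0), if_pos (by omega : (0:Int) < m)]
  rw [if_neg (by omega : ¬ (0:Int) < 0)]
  have hse : ¬ ((if c - 1 < 0 then max (c - 1 + (L.length:Int)) 0 else min (c - 1) (L.length:Int)) < min 0 (L.length:Int)) := by
    split_ifs with h <;> omega
  rw [if_neg hse]
  simp

-- 1 ≤ m = len, 1-m ≤ c ≤ 0: one row = the whole string, both sides are the single wrapped character
theorem case_onerow (L : List Char) (m c : Int) (hm : 1 ≤ m) (hlen : (L.length : Int) = m)
    (hc1 : 1 - m ≤ c) (hc0 : c ≤ 0) :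
    (((PySem.List.pyRange 0 (PySem.Int.floordiv (L.length : Int) m) 1).foldl
      (fun acc i => acc ++ [PySem.List.slice L (some (m * i)) (some (m * i + m))]) []).foldl
      (fun acc val => acc ++ ((PySem.List.pyGet? val (c - 1)).map (fun ch => [ch])).getD []) [])
    = (PySem.Chars.slice? L (some (c - 1)) (some ((PySem.Int.floordiv (L.length : Int) m) * m)) m).getD [] := by
  subst hlen
  have hn : PySem.Int.floordiv (L.length : Int) (L.length : Int) = 1 := by
    rw [PySem.Int.floordiv_eq_ediv_of_pos (by omega : (0:Int) < (L.length:Int))]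
    exact Int.ediv_self (by omega)
  rw [hn]
  have hrange : PySem.List.pyRange 0 1 1 = [0] := by decide
  rw [hrange]
  simp only [List.foldl_cons, List.foldl_nil, mul_zero, zero_add, List.nil_append, one_mul]
  have hrow : PySem.List.slice L (some 0) (some (L.length : Int)) = L := by
    rw [PySem.List.slice_zero_start, PySem.List.slice_to_natCast]
    exact List.take_length
  rw [hrow]
  have hget : PySem.List.pyGet? L (c - 1) = L[(L.length - (1 - c).toNat)]? := by
    simp only [PySem.List.pyGet?, PySem.List.pyIdx?]
    rw [if_neg (by omega : ¬ (0:Int) ≤ c - 1), if_pos (by omega : -(L.length:Int) ≤ c - 1)]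
    simp only [Option.bind_some]
    have h2 : (-(c-1)).toNat = (1-c).toNat := by omega
    rw [h2]
  rw [hget]
  rw [PySem.Chars.slice?_eq_listSlice?]
  have hM0 : (L.length : Int) ≠ 0 := by omega
  simp only [PySem.List.slice?, PySem.List.sliceIndices, if_neg hM0,
    if_neg (by omega : ¬ (L.length:Int) < 0), if_pos (by omega : (0:Int) < (L.length:Int)),
    if_pos (by omega : c - 1 < 0)]
  have hstart : max (c - 1 + (L.length:Int)) 0 = c - 1 + (L.length:Int) := by omega
  have hstop : min ((L.length:Int)) ((L.length:Int)) = (L.length:Int) := by omega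
  rw [hstart, hstop, if_pos (by omega : c - 1 + (L.length:Int) < (L.length:Int))]
  have hcount : (((L.length:Int) - (c - 1 + (L.length:Int)) + (L.length:Int) - 1) / (L.length:Int)).toNat = 1 := by
    have h1 : ((L.length:Int) - (c - 1 + (L.length:Int)) + (L.length:Int) - 1) = -c + 1*(L.length:Int) := by ring
    rw [h1, Int.add_mul_ediv_right _ _ hM0,
        Int.ediv_eq_zero_of_lt (by omega) (by omega)]
    rfl
  rw [hcount]
  have hr1 : List.range 1 = [0] := by decide
  rw [hr1]
  simp only [List.filterMap_cons, Nat.cast_zero, mul_zero, add_zero]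
  have hidx : (c - 1 + (L.length:Int)).toNat = L.length - (1 - c).toNat := by omega
  rw [hidx]
  cases h : L[(L.length - (1 - c).toNat)]? <;> simp

-- ===== VERDICT (by name: the statements are the Claim_ definitions above) =====
theorem solution_spec : Claim_equal_solution := by
  intro s m c _ hpre
  obtain ⟨hm0, himp⟩ := hpre
  rw [PySem.Str.len_eq] at himp
  unfold Spec_solution
  unfold solution solution_alt
  dsimp only
  rw [show PySem.Str.len s = ((s.toList.length : Nat) : Int) from PySem.Str.len_eq s]
  rw [show PySem.Str.slice? s (some (c - 1))
        (some (PySem.Int.floordiv (s.toList.length : Int) m * m)) m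
      = Option.map String.ofList (PySem.Chars.slice? s.toList (some (c - 1))
        (some (PySem.Int.floordiv (s.toList.length : Int) m * m)) m) from rfl]
  have key : (((PySem.List.pyRange 0 (PySem.Int.floordiv (s.toList.length : Int) m) 1).foldl
      (fun acc i => acc ++ [PySem.List.slice s.toList (some (m * i)) (some (m * i + m))]) []).foldl
      (fun acc val => acc ++ ((PySem.List.pyGet? val (c - 1)).map (fun ch => [ch])).getD []) [])
    = (PySem.Chars.slice? s.toList (some (c - 1)) (some ((PySem.Int.floordiv (s.toList.length : Int) m) * m)) m).getD [] := by
    rcases (by omega : m < 0 ∨ 0 ≤ m) with hneg | hpos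
    · exact case_neg s.toList m c (by omega)
    · have hm : 1 ≤ m := by omega
      rcases (by omega : ((s.toList.length : Int)) < m ∨ m ≤ ((s.toList.length : Int))) with hlt | hge
      · exact case_short s.toList m c hm hlt
      · have hc := himp ⟨hm, hge⟩
        rcases (by omega : 1 ≤ c ∨ c < 1) with hc1 | hc0
        · exact case_main s.toList m c hm hc1 hc.2.1
        · have hEq : ((s.toList.length : Int)) = m := by
            rcases hc.2.2 with h | h
            · omega
            · omega
          exact case_onerow s.toList m c hm hEq hc.1 (by omega)
  rw [key]
  cases PySem.Chars.slice? s.toList (some (c - 1))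
      (some (PySem.Int.floordiv (s.toList.length : Int) m * m)) m <;> rfl
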